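-- pv_equiv track=rewrite | github.com/yg-moon/problem-solving | 2-websites/programmers/pccp/mock-1/Q3-유전법칙.py | solve
-- ===== SOURCE A (Python) =====
-- def solve(n, p):
--     if n == 1:
--         return "Rr"
--
--     parent = solve(n - 1, (p - 1) // 4 + 1)
--
--     if parent == "RR" or parent == "rr":
--         return parent
--     else:
--         if p % 4 == 0:
--             return "rr"
--         elif p % 4 == 1:
--             return "RR"
--         else:
--             return "Rr"
-- ===== SOURCE B (Python) =====
-- def solve(n, p):
--     # Single leaf-to-root pass, no list, no recursion: a decisive position
--     # (p % 4 in {0, 1}) closer to the root overrides any deeper one, so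
--     # overwriting an accumulator while walking up gives the root-most verdict.
--     ans = "Rr"
--     while n > 1:
--         m = p % 4
--         if m == 0:
--             ans = "rr"
--         elif m == 1:
--             ans = "RR"
--         p = (p - 1) // 4 + 1
--         n -= 1
--     return ans
-- ===== Notes on version B (the rewrite author's own statement) =====
-- stated objective: alternative
-- what changed: Replaces the depth-n recursion (first decisive ancestor found top-down) by one iterative leaf-to-root pass that overwrites an accumulator at every decisive position, so the root-most verdict survives; no recursion and O(1) extra space.
import Mathlib
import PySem

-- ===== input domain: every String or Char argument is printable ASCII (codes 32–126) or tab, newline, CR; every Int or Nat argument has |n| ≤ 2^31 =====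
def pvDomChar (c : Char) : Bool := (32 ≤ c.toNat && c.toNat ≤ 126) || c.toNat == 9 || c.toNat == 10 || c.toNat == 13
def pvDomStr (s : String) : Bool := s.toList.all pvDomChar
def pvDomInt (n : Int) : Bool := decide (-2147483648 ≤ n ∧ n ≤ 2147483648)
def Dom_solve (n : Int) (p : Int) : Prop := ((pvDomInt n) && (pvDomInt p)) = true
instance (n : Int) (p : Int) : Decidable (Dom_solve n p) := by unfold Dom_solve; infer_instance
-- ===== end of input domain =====

-- B replaces A's depth-n recursion by a single iterative leaf-to-root pass overwriting an
-- accumulator at every decisive position (objective: alternative; no recursion, O(1) space).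

-- ===== PORT A =====
-- A recurses with n decreasing by 1 each call; fuel n.toNat covers the whole recursion
-- on Pre_ (fuel only makes it total; the algorithm is A's, branch for branch).
def solveGo : Nat → Int → Int → String
  | 0, _, _ => "Rr"  -- never reached when 1 ≤ n and fuel = n.toNat
  | k + 1, n, p =>
    if n == 1 then "Rr"
    else
      let parent := solveGo k (n - 1) (PySem.Int.floordiv (p - 1) 4 + 1)
      if parent == "RR" || parent == "rr" then parent
      else
        if PySem.Int.mod p 4 == 0 then "rr"
        else if PySem.Int.mod p 4 == 1 then "RR"
        else "Rr"

def solve (n : Int) (p : Int) : String := solveGo n.toNat n p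

-- ===== PORT B =====
-- while n > 1: overwrite ans at decisive positions; p = (p-1)//4 + 1; n -= 1
-- (fuel n.toNat bounds the loop count n-1; ans is the accumulator variable)
def altGo : Nat → Int → Int → String → String
  | 0, _, _, ans => ans
  | k + 1, n, p, ans =>
    if n > 1 then
      let m := PySem.Int.mod p 4
      let ans' := if m == 0 then "rr" else if m == 1 then "RR" else ans
      altGo k (n - 1) (PySem.Int.floordiv (p - 1) 4 + 1) ans'
    else ans

def solve_alt (n : Int) (p : Int) : String := altGo n.toNat n p "Rr"

-- ===== PRECONDITION & SPEC =====
-- A is a recursion of depth n: it raises RecursionError for n < 1 (no base case is reached)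
-- and for n ≥ 1000 (Python's default recursion limit); Pre_ excludes exactly those crashes.
def Pre_solve (n : Int) (p : Int) : Prop := 1 ≤ n ∧ n ≤ 999
instance (n : Int) (p : Int) : Decidable (Pre_solve n p) := by unfold Pre_solve; infer_instance
def pvWitness_solve : Int × Int := (3, 26)

def Spec_solve (n : Int) (p : Int) (out : String) : Prop := out = solve_alt n p
instance (n : Int) (p : Int) (out : String) : Decidable (Spec_solve n p out) := by unfold Spec_solve; infer_instance

-- ===== CLAIM (what is proved, stated in full; the proofs are below) =====
def Claim_equal_solve : Prop := ∀ (n : Int) (p : Int), Dom_solve n p → Pre_solve n p → Spec_solve n p (solve n p)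

-- ===== LEMMAS AND PROOFS =====

-- A's recursion only ever produces one of the three genotypes
lemma solveGo_values (k : Nat) (n p : Int) :
    solveGo k n p = "Rr" ∨ solveGo k n p = "RR" ∨ solveGo k n p = "rr" := by
  induction k generalizing n p with
  | zero => left; rfl
  | succ k ih =>
    simp only [solveGo]
    split_ifs with h1 h2 h3 h4
    · left; rfl
    · rcases ih (n - 1) (PySem.Int.floordiv (p - 1) 4 + 1) with h | h | h <;> simp_all
    · right; right; rfl
    · right; left; rfl
    · left; rfl

-- the accumulator loop computes A's result, with ans surviving exactly when A says "Rr"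
lemma altGo_eq (k : Nat) : ∀ (n p : Int) (ans : String), n.toNat = k → 1 ≤ n →
    altGo k n p ans = if solveGo k n p = "Rr" then ans else solveGo k n p := by
  induction k with
  | zero => intro n p ans hk hn; omega
  | succ k ih =>
    intro n p ans hk hn
    by_cases h1 : n = 1
    · subst h1; simp [altGo, solveGo]
    · have hn2 : (1 : Int) < n := by omega
      have hk' : (n - 1).toNat = k := by omega
      simp only [altGo, hn2, if_pos, solveGo, beq_iff_eq, h1, if_neg, not_false_iff]
      rw [ih (n - 1) (PySem.Int.floordiv (p - 1) 4 + 1) _ hk' (by omega)]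
      rcases solveGo_values k (n - 1) (PySem.Int.floordiv (p - 1) 4 + 1) with h | h | h <;>
        · rw [h]; split_ifs <;> simp_all

-- ===== VERDICT (by name: the statement is the Claim_ definition above) =====
theorem solve_spec : Claim_equal_solve := by
  intro n p _hd hpre
  unfold Spec_solve solve solve_alt
  rw [altGo_eq n.toNat n p "Rr" rfl hpre.1]
  split_ifs with h <;> simp [h]
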